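-- pv_equiv track=rewrite | github.com/thanosa/coding-challenges | codingame/competitions/02_pacman/bot.py | find_available_pacs
-- ===== SOURCE A (Python) =====
-- def find_available_pacs(pacs, pac_to_unstuck=None, pac_to_super=None, pac_to_normal=None):
--     """
--     Finds the available pacs that are not assigned
--     """
--
--     available_pacs = pacs['mine']
--
--     if pac_to_unstuck is not None:
--         available_pacs = [x for x in available_pacs if x['id'] not in pac_to_unstuck.keys()]
--
--     if pac_to_super is not None:
--         available_pacs = [x for x in available_pacs if x['id'] not in pac_to_super.keys()]
--
--     if pac_to_normal is not None:
--         available_pacs = [x for x in available_pacs if x['id'] not in pac_to_normal.keys()]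
--
--     return available_pacs
-- ===== SOURCE B (Python) =====
-- def find_available_pacs(pacs, pac_to_unstuck=None, pac_to_super=None, pac_to_normal=None):
--     """
--     Finds the available pacs that are not assigned.
--     Single-pass rewrite: build one excluded-id set from the non-None
--     assignment dicts, then keep the pacs whose id is not excluded.
--     """
--     excluded = set()
--     for d in (pac_to_unstuck, pac_to_super, pac_to_normal):
--         if d is not None:
--             excluded.update(d.keys())
--     mine = pacs['mine']
--     if not excluded:
--         return list(mine)
--     return [x for x in mine if x['id'] not in excluded]
-- ===== Notes on version B (the rewrite author's own statement) =====
-- stated objective: simpler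
-- what changed: Replaces A's three chained filter passes (one per assignment dict) by building a single excluded-id set from the non-None dicts and doing one filter pass over pacs['mine'].
-- outside the precondition, e.g. on find_available_pacs({}, None, None, None): A raises KeyError, B raises KeyError
import Mathlib
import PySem

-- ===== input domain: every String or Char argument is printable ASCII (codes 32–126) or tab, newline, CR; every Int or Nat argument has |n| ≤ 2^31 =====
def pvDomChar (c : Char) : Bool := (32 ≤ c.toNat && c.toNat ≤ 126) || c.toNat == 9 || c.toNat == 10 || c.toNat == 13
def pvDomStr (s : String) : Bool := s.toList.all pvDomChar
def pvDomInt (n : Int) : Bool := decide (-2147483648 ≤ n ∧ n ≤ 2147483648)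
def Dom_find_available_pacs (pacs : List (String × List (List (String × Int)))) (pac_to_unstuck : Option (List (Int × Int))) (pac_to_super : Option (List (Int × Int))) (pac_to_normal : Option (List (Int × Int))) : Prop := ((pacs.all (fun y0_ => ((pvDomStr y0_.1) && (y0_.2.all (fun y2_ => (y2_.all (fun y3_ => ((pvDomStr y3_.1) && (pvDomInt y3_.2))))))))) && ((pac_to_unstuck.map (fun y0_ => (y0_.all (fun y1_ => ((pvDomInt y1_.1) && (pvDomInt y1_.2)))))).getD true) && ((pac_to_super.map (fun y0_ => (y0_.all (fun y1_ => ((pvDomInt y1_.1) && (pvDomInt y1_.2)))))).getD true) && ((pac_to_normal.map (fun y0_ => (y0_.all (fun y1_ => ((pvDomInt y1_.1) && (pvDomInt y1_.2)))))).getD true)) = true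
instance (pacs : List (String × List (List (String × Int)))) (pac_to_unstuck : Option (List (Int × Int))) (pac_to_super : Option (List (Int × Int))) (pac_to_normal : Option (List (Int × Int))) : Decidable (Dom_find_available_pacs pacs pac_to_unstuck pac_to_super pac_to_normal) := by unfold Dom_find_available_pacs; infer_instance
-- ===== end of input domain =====

-- B builds one excluded-id set from the non-None assignment dicts and filters
-- pacs['mine'] in a single pass, instead of A's three chained filter passes (objective: simpler).


-- x['id']: Pre_ guarantees the key is present whenever either program evaluates it inside a filter
def pvGetId (x : List (String × Int)) : Int := ((PySem.Dict.mk x).get? "id").getD 0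

-- ===== PORT A =====
def find_available_pacs (pacs : List (String × List (List (String × Int)))) (pac_to_unstuck : Option (List (Int × Int))) (pac_to_super : Option (List (Int × Int))) (pac_to_normal : Option (List (Int × Int))) : List (List (String × Int)) :=
  let available0 := ((PySem.Dict.mk pacs).get? "mine").getD []        -- pacs['mine']; Pre_ makes get? some
  let available1 := match pac_to_unstuck with
    | none => available0
    | some d => available0.filter (fun x => !((PySem.Dict.mk d).keys.contains (pvGetId x)))
  let available2 := match pac_to_super with
    | none => available1
    | some d => available1.filter (fun x => !((PySem.Dict.mk d).keys.contains (pvGetId x)))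
  let available3 := match pac_to_normal with
    | none => available2
    | some d => available2.filter (fun x => !((PySem.Dict.mk d).keys.contains (pvGetId x)))
  available3

-- ===== PORT B =====
def find_available_pacs_alt (pacs : List (String × List (List (String × Int)))) (pac_to_unstuck : Option (List (Int × Int))) (pac_to_super : Option (List (Int × Int))) (pac_to_normal : Option (List (Int × Int))) : List (List (String × Int)) :=
  let excluded : PySem.Set Int :=
    [pac_to_unstuck, pac_to_super, pac_to_normal].foldl
      (fun acc d => match d with
        | none => acc
        | some dd => PySem.Set.update acc (PySem.Dict.mk dd).keys)
      PySem.Set.empty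
  let mine := ((PySem.Dict.mk pacs).get? "mine").getD []              -- pacs['mine']; Pre_ makes get? some
  if excluded.isEmpty then mine
  else mine.filter (fun x => !(PySem.Set.contains excluded (pvGetId x)))

-- ===== PRECONDITION & SPEC =====
-- Pre_: exactly where the Python A returns normally — pacs has the key 'mine', and, whenever any of the
-- three assignment dicts is given (so A's filters run and read x['id']), every pac in pacs['mine'] has key 'id'.
def Pre_find_available_pacs (pacs : List (String × List (List (String × Int)))) (pac_to_unstuck : Option (List (Int × Int))) (pac_to_super : Option (List (Int × Int))) (pac_to_normal : Option (List (Int × Int))) : Prop :=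
  (((PySem.Dict.mk pacs).get? "mine").isSome = true) ∧
  ((pac_to_unstuck.isSome = true ∨ pac_to_super.isSome = true ∨ pac_to_normal.isSome = true) →
    ∀ x ∈ ((PySem.Dict.mk pacs).get? "mine").getD [], ((PySem.Dict.mk x).get? "id").isSome = true)
instance (pacs : List (String × List (List (String × Int)))) (pac_to_unstuck : Option (List (Int × Int))) (pac_to_super : Option (List (Int × Int))) (pac_to_normal : Option (List (Int × Int))) : Decidable (Pre_find_available_pacs pacs pac_to_unstuck pac_to_super pac_to_normal) := by unfold Pre_find_available_pacs; infer_instance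

def pvWitness_find_available_pacs : (List (String × List (List (String × Int)))) × (Option (List (Int × Int))) × (Option (List (Int × Int))) × (Option (List (Int × Int))) :=
  ([("mine", [[("id", 1)], [("id", 2)], [("id", 3)]])], some [(1, 5)], none, some [(3, 7)])

def Spec_find_available_pacs (pacs : List (String × List (List (String × Int)))) (pac_to_unstuck : Option (List (Int × Int))) (pac_to_super : Option (List (Int × Int))) (pac_to_normal : Option (List (Int × Int))) (out : List (List (String × Int))) : Prop := out = find_available_pacs_alt pacs pac_to_unstuck pac_to_super pac_to_normal
instance (pacs : List (String × List (List (String × Int)))) (pac_to_unstuck : Option (List (Int × Int))) (pac_to_super : Option (List (Int × Int))) (pac_to_normal : Option (List (Int × Int))) (out : List (List (String × Int))) : Decidable (Spec_find_available_pacs pacs pac_to_unstuck pac_to_super pac_to_normal out) := by unfold Spec_find_available_pacs; infer_instance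

-- ===== CLAIM (what is proved, stated in full; the proofs are below) =====
def Claim_equal_find_available_pacs : Prop := ∀ (pacs : List (String × List (List (String × Int)))) (pac_to_unstuck : Option (List (Int × Int))) (pac_to_super : Option (List (Int × Int))) (pac_to_normal : Option (List (Int × Int))), Dom_find_available_pacs pacs pac_to_unstuck pac_to_super pac_to_normal → Pre_find_available_pacs pacs pac_to_unstuck pac_to_super pac_to_normal → Spec_find_available_pacs pacs pac_to_unstuck pac_to_super pac_to_normal (find_available_pacs pacs pac_to_unstuck pac_to_super pac_to_normal)

-- ===== LEMMAS AND PROOFS =====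

-- the key list a given optional assignment dict contributes ([] for None)
def pvOptKeys (o : Option (List (Int × Int))) : List Int :=
  match o with
  | none => []
  | some d => (PySem.Dict.mk d).keys

-- one filter stage of A, rewritten as an unconditional filter over the contributed keys
theorem pv_step_eq (l : List (List (String × Int))) (o : Option (List (Int × Int))) :
    (match o with
      | none => l
      | some d => l.filter (fun x => !((PySem.Dict.mk d).keys.contains (pvGetId x))))
    = l.filter (fun x => !((pvOptKeys o).contains (pvGetId x))) := by
  cases o with
  | none => simp [pvOptKeys]
  | some d => rfl

-- B's accumulation step, rewritten through pvOptKeys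
theorem pv_acc_eq (acc : PySem.Set Int) (o : Option (List (Int × Int))) :
    (match o with
      | none => acc
      | some dd => PySem.Set.update acc (PySem.Dict.mk dd).keys)
    = PySem.Set.update acc (pvOptKeys o) := by
  cases o with
  | none => rfl
  | some d => rfl

-- ===== VERDICT (by name: the statement is the Claim_ definition above) =====
theorem find_available_pacs_spec : Claim_equal_find_available_pacs := by
  intro pacs u s n _hDom _hPre
  unfold Spec_find_available_pacs find_available_pacs find_available_pacs_alt
  simp only [List.foldl, pv_acc_eq, pv_step_eq]
  set mine := ((PySem.Dict.mk pacs).get? "mine").getD [] with hmine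
  set ex : PySem.Set Int :=
    PySem.Set.update (PySem.Set.update (PySem.Set.update PySem.Set.empty (pvOptKeys u)) (pvOptKeys s)) (pvOptKeys n) with hex
  have hmem : ∀ z : Int, z ∈ ex ↔ z ∈ pvOptKeys u ∨ z ∈ pvOptKeys s ∨ z ∈ pvOptKeys n := by
    intro z
    simp [hex, PySem.Set.mem_update, PySem.Set.empty, or_assoc]
  by_cases hE : ex.isEmpty
  · -- all contributed key lists are empty, so every filter keeps everything
    have hnil : ∀ z : Int, z ∉ pvOptKeys u ∧ z ∉ pvOptKeys s ∧ z ∉ pvOptKeys n := by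
      intro z
      have : z ∉ ex := by
        rw [List.isEmpty_iff] at hE
        simp [hE]
      rw [hmem] at this
      tauto
    have hu : pvOptKeys u = [] := List.eq_nil_iff_forall_not_mem.mpr (fun z => (hnil z).1)
    have hs : pvOptKeys s = [] := List.eq_nil_iff_forall_not_mem.mpr (fun z => (hnil z).2.1)
    have hn : pvOptKeys n = [] := List.eq_nil_iff_forall_not_mem.mpr (fun z => (hnil z).2.2)
    simp [hE, hu, hs, hn]
  · -- one combined filter pass
    simp only [hE, if_neg, Bool.false_eq_true, not_false_eq_true, List.filter_filter]
    refine (List.filter_congr ?_).symm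
    intro x _
    have h := hmem (pvGetId x)
    by_cases h1 : pvGetId x ∈ pvOptKeys u <;> by_cases h2 : pvGetId x ∈ pvOptKeys s <;>
      by_cases h3 : pvGetId x ∈ pvOptKeys n <;> simp [h, h1, h2, h3]
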